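-- pv_equiv track=rewrite | github.com/ConnortheFan/counting-0s-in-sorted-binary-list | main.py | count_0s
-- ===== SOURCE A (Python) =====
-- def count_0s(list):
--   midpoint = len(list)//2
--   zeros = 0
--   if len(list) == 1:
--     if list[0] == 0:
--       zeros += 1
--   elif list[midpoint] == 0:
--     zeros += len(list[:midpoint+1])
--     zeros += count_0s(list[midpoint+1:])
--   elif list[midpoint] == 1:
--     zeros += count_0s(list[:midpoint])
--   return zeros
-- ===== SOURCE B (Python) =====
-- def count_0s(list):
--   # Iterative in-place binary descent over an index window [lo, hi) with a running
--   # zeros counter -- no slicing, no recursion; same probes as A.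
--   zeros = 0
--   lo, hi = 0, len(list)
--   while hi - lo > 1:
--     mid = lo + (hi - lo) // 2
--     v = list[mid]
--     if v == 0:
--       zeros += mid + 1 - lo
--       lo = mid + 1
--     elif v == 1:
--       hi = mid
--     else:
--       return zeros
--   if hi - lo == 1 and list[lo] == 0:
--     zeros += 1
--   return zeros
-- ===== Notes on version B (the rewrite author's own statement) =====
-- stated objective: alternative
-- what changed: Replaced A's recursive slice-and-count descent (which copies a sublist at every level and sums the recursive results) by an iterative in-place descent over an index window [lo, hi) with a running zeros counter: no slicing, no recursion, same probes.
import Mathlib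
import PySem

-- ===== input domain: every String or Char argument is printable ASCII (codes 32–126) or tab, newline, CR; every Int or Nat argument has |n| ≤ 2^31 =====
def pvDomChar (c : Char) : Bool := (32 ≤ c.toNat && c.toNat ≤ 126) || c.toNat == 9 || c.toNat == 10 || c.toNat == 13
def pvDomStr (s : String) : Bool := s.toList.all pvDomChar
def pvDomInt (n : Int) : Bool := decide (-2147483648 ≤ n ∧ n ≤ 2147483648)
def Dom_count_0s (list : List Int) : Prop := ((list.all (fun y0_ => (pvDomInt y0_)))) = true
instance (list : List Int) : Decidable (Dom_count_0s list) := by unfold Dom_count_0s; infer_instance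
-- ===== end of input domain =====

-- B replaces A's recursive slice-and-count descent by an iterative in-place descent over
-- an index window with a running zeros counter: no slicing, no recursion (alternative).

-- ===== PORT A =====
-- Literal port of A's recursion.  midpoint = len(list)//2 with a nonnegative length is
-- Nat division; list[:p] / list[p:] with nonnegative p are List.take / List.drop (exact
-- there); the fuel argument (list.length bounds the recursion depth, which shrinks the
-- list each call) and the in-range test on list[midpoint] are totality guards only: the
-- out-of-fuel/out-of-range arms are reached exactly where Python raises IndexError
-- (an empty list), which Pre_ excludes.
def count_0s_go (fuel : Nat) (list : List Int) : Int :=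
  match fuel with
  | 0 => 0
  | fuel + 1 =>
    let midpoint := list.length / 2
    if list.length = 1 then
      (if list.getD 0 0 = 0 then 1 else 0)
    else if hm : midpoint < list.length then
      if list[midpoint] = 0 then
        ((list.take (midpoint + 1)).length : Int) + count_0s_go fuel (list.drop (midpoint + 1))
      else if list[midpoint] = 1 then
        count_0s_go fuel (list.take midpoint)
      else 0
    else 0

def count_0s (list : List Int) : Int :=
  count_0s_go list.length list

-- ===== PORT B =====
-- Literal port of Source B's while loop; the fuel argument is a totality guard only (the
-- window hi - lo shrinks every iteration, so list.length calls always suffice and the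
-- out-of-fuel arm returns the accumulator exactly as the loop exit does on an empty
-- window).  list[mid] / list[lo] are always in range when entered with hi ≤ len as
-- count_0s_alt does, so List.getD is exact there.
def count0sLoop (fuel : Nat) (zeros : Int) (lo hi : Nat) (list : List Int) : Int :=
  match fuel with
  | 0 => zeros
  | fuel + 1 =>
    if hi - lo > 1 then
      let mid := lo + (hi - lo) / 2
      let v := list.getD mid 0
      if v = 0 then count0sLoop fuel (zeros + ((mid + 1 - lo : Nat) : Int)) (mid + 1) hi list
      else if v = 1 then count0sLoop fuel zeros lo mid list
      else zeros
    else if hi - lo = 1 ∧ list.getD lo 0 = 0 then zeros + 1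
    else zeros

def count_0s_alt (list : List Int) : Int :=
  count0sLoop list.length 0 0 list.length list

-- ===== PRECONDITION & SPEC =====
-- pvWin follows only A's probe WINDOW [lo, hi) (it computes no count): it is true exactly
-- when the halving descent ends in a window of size 1 or at a non-binary probe, false
-- exactly when the descent reaches an empty window — the point where A slices down to []
-- and its `list[midpoint]` raises IndexError.  The first argument starts at the window
-- size and bounds the number of descent steps (each step shrinks the window).
def pvWin (list : List Int) : Nat → Nat → Nat → Bool
  | 0, _, _ => false
  | n + 1, lo, hi =>
    if hi - lo ≤ 1 then hi - lo == 1
    else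
      let mid := lo + (hi - lo) / 2
      if list.getD mid 0 = 0 then pvWin list n (mid + 1) hi
      else if list.getD mid 0 = 1 then pvWin list n lo mid
      else true

-- Pre_ excludes exactly the inputs on which A raises IndexError: the empty list and the
-- lists whose halving probe descent reaches an empty window (e.g. [0,0], [0,0,1,1]).
-- It excludes NO input on which A returns a value.
def Pre_count_0s (list : List Int) : Prop :=
  pvWin list list.length 0 list.length = true
instance (list : List Int) : Decidable (Pre_count_0s list) := by
  unfold Pre_count_0s; infer_instance

def pvWitness_count_0s : List Int := [0, 0, 1]

def Spec_count_0s (list : List Int) (out : Int) : Prop := out = count_0s_alt list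
instance (list : List Int) (out : Int) : Decidable (Spec_count_0s list out) := by
  unfold Spec_count_0s; infer_instance

-- ===== CLAIM (what is proved, stated in full; the proofs are below) =====
def Claim_equal_count_0s : Prop :=
  ∀ (list : List Int), Dom_count_0s list → Pre_count_0s list →
    Spec_count_0s list (count_0s list)

-- ===== LEMMAS AND PROOFS =====

-- the window [lo, hi) of l, as the sublist A recurses on
def pvW (l : List Int) (lo hi : Nat) : List Int := (l.drop lo).take (hi - lo)

theorem pvW_length (l : List Int) (lo hi : Nat) (h : hi ≤ l.length) :
    (pvW l lo hi).length = hi - lo := by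
  simp [pvW]; omega

theorem pvW_getD (l : List Int) (lo hi i : Nat) (hi1 : i < hi - lo) :
    (pvW l lo hi).getD i 0 = l.getD (lo + i) 0 := by
  simp [pvW, List.getD_eq_getElem?_getD, List.getElem?_take_of_lt hi1, List.getElem?_drop]

theorem pvW_drop (l : List Int) (lo hi d : Nat) :
    (pvW l lo hi).drop d = pvW l (lo + d) hi := by
  unfold pvW
  rw [List.drop_take, List.drop_drop]
  congr 1 <;> omega

theorem pvW_take (l : List Int) (lo hi t : Nat) (h : t ≤ hi - lo) :
    (pvW l lo hi).take t = pvW l lo (lo + t) := by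
  unfold pvW
  rw [List.take_take]
  congr 1 <;> omega

-- main invariant: on a non-crashing window, B's loop adds exactly what A computes on
-- the corresponding sublist
theorem pv_main (l : List Int) : ∀ (f lo hi : Nat), hi ≤ l.length → hi - lo ≤ f →
    pvWin l f lo hi = true → ∀ zeros : Int,
    count0sLoop f zeros lo hi l = zeros + count_0s_go f (pvW l lo hi) := by
  intro f
  induction f with
  | zero =>
    intro lo hi _ hb hw
    simp [pvWin] at hw
  | succ f ih =>
    intro lo hi hlen hb hw zeros
    have hwl : (pvW l lo hi).length = hi - lo := pvW_length l lo hi hlen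
    by_cases hs : hi - lo ≤ 1
    · -- window of size 0 or 1
      rw [pvWin] at hw
      rw [if_pos hs] at hw
      have h1 : hi - lo = 1 := by simpa using hw
      have hg : (pvW l lo hi).getD 0 0 = l.getD lo 0 := by
        simpa using pvW_getD l lo hi 0 (by omega)
      have hrhs : count_0s_go (f + 1) (pvW l lo hi) = if l.getD lo 0 = 0 then 1 else 0 := by
        rw [count_0s_go]
        simp only [hwl, h1]
        simp only [List.getD_eq_getElem?_getD] at hg
        simp [hg]
      rw [count0sLoop, if_neg (show ¬(hi - lo > 1) by omega), hrhs]
      by_cases hz : l.getD lo 0 = 0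
      · rw [if_pos ⟨h1, hz⟩, if_pos hz]
      · rw [if_neg (show ¬(hi - lo = 1 ∧ l.getD lo 0 = 0) from fun hc => hz hc.2), if_neg hz]
        simp
    · -- window of size ≥ 2
      have hs2 : 2 ≤ hi - lo := by omega
      have hwm2 : (hi - lo) / 2 < hi - lo := by omega
      rw [pvWin] at hw
      rw [if_neg hs] at hw
      simp only at hw
      have hgm : ∀ (hp : (hi - lo) / 2 < (pvW l lo hi).length),
          (pvW l lo hi)[(hi - lo) / 2]'hp = l.getD (lo + (hi - lo) / 2) 0 := by
        intro hp
        have := pvW_getD l lo hi ((hi - lo) / 2) (by omega)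
        rw [List.getD_eq_getElem?_getD, List.getElem?_eq_getElem hp] at this
        simpa using this
      have hlhs : count0sLoop (f + 1) zeros lo hi l =
          (if l.getD (lo + (hi - lo) / 2) 0 = 0 then
            count0sLoop f (zeros + ((lo + (hi - lo) / 2 + 1 - lo : Nat) : Int))
              (lo + (hi - lo) / 2 + 1) hi l
          else if l.getD (lo + (hi - lo) / 2) 0 = 1 then
            count0sLoop f zeros lo (lo + (hi - lo) / 2) l
          else zeros) := by
        rw [count0sLoop, if_pos (show hi - lo > 1 by omega)]
      have hrhs : count_0s_go (f + 1) (pvW l lo hi) =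
          (if l.getD (lo + (hi - lo) / 2) 0 = 0 then
            (((pvW l lo hi).take ((hi - lo) / 2 + 1)).length : Int) +
              count_0s_go f ((pvW l lo hi).drop ((hi - lo) / 2 + 1))
          else if l.getD (lo + (hi - lo) / 2) 0 = 1 then
            count_0s_go f ((pvW l lo hi).take ((hi - lo) / 2))
          else 0) := by
        rw [count_0s_go]
        simp only [hwl]
        rw [if_neg (show ¬(hi - lo = 1) by omega), dif_pos hwm2]
        simp only [hgm]
      rw [hlhs, hrhs]
      by_cases h0 : l.getD (lo + (hi - lo) / 2) 0 = 0
      · rw [if_pos h0] at hw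
        rw [if_pos h0, if_pos h0]
        have htk : ((pvW l lo hi).take ((hi - lo) / 2 + 1)).length = (hi - lo) / 2 + 1 := by
          rw [List.length_take, hwl]
          omega
        have hassoc : lo + ((hi - lo) / 2 + 1) = lo + (hi - lo) / 2 + 1 := by omega
        rw [htk, pvW_drop, hassoc,
          ih (lo + (hi - lo) / 2 + 1) hi hlen (by omega) hw]
        have hc : ((lo + (hi - lo) / 2 + 1 - lo : Nat) : Int) = (((hi - lo) / 2 + 1 : Nat) : Int) := by
          congr 1
          omega
        rw [hc]
        push_cast
        ring
      · rw [if_neg h0] at hw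
        rw [if_neg h0, if_neg h0]
        by_cases h1 : l.getD (lo + (hi - lo) / 2) 0 = 1
        · rw [if_pos h1] at hw
          rw [if_pos h1, if_pos h1, pvW_take l lo hi ((hi - lo) / 2) (by omega),
            ih lo (lo + (hi - lo) / 2) (by omega) (by omega) hw]
        · rw [if_neg h1] at hw
          rw [if_neg h1, if_neg h1]
          simp

-- ===== VERDICT (by name: the statement is the Claim_ definition above) =====
theorem count_0s_spec : Claim_equal_count_0s := by
  intro list _ hpre
  unfold Spec_count_0s count_0s_alt count_0s
  rw [pv_main list list.length 0 list.length (le_refl _) (by omega) hpre 0]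
  simp [pvW]
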